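-- pv_equiv track=rewrite | github.com/Nekhaenko/aws_docker | image/src/utils.py | detect_colums
-- ===== SOURCE A (Python) =====
-- def detect_colums(all_lines: list) -> list:
--     border_indexes = []
--     curr_border = False
--     for_delete = []
--     len_all_lines = len(all_lines)
--     zindex = 0
--
--     for i in zip(*all_lines):
--
--         prev_border = curr_border
--
--         if '|' * len_all_lines == ''.join(i):
--             curr_border = True
--         else:
--             curr_border = False
--
--         if curr_border and prev_border:
--             for_delete.append(zindex)
--         elif curr_border and not prev_border:
--             border_indexes.append(zindex)
--
--         zindex += 1
--
--     col_name_list = [[] for _ in range(len(border_indexes))]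
--
--     for bidx, bnum in enumerate(border_indexes):
--         b_end_idx = bidx + 1
--
--         if b_end_idx == len(border_indexes):
--             b_end_num = None
--         else:
--             b_end_num = border_indexes[bidx + 1]
--
--         for line in all_lines:
--             col_name_list[bidx].append(line[bnum:b_end_num])
--
--     colums = []
--
--     for i in col_name_list:
--         col_name = ' '.join(i).replace('|', '').strip().replace('_', ' ')
--         colums.append(col_name)
--
--     return colums
-- ===== SOURCE B (Python) =====
-- def detect_colums(all_lines: list) -> list:
--     # border columns = intersection of each line's set of '|' positions
--     pipe_sets = [{i for i, ch in enumerate(line) if ch == '|'} for line in all_lines]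
--     border = set.intersection(*pipe_sets) if pipe_sets else set()
--     # run starts: border columns whose left neighbour is not a border column
--     starts = sorted(c for c in border if c - 1 not in border)
--     # distribute each line's characters among the groups in one walk,
--     # dropping '|' on the fly (equivalent to replace('|','') later)
--     groups = [[] for _ in starts]
--     for line in all_lines:
--         bufs = [[] for _ in starts]
--         g = -1
--         for idx, ch in enumerate(line):
--             if g + 1 < len(starts) and starts[g + 1] == idx:
--                 g += 1
--             if g >= 0 and ch != '|':
--                 bufs[g].append(ch)
--         for grp, buf in zip(groups, bufs):
--             grp.append(''.join(buf))
--     return [' '.join(grp).strip().replace('_', ' ') for grp in groups]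
-- ===== Notes on version B (the rewrite author's own statement) =====
-- stated objective: alternative
-- what changed: A transposes the lines (zip) and runs a stateful prev/curr border scan, then slices every line once per group between consecutive border indexes; B instead intersects the per-line sets of '|' positions to get the border columns, keeps those whose left neighbour is not a border, and then walks each line once with a group pointer, distributing characters to group buffers and dropping '|' on the fly, so no per-group slicing pass remains.
import Mathlib
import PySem

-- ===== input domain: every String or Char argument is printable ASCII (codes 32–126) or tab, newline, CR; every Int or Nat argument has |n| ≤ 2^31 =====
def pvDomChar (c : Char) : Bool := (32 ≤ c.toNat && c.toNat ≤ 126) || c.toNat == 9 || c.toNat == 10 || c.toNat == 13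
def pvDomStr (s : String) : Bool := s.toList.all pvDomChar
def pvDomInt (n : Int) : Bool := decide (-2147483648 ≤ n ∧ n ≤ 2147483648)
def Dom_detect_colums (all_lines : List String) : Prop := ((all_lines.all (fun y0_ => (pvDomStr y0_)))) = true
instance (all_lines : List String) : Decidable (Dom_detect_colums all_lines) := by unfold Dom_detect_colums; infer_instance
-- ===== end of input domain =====

-- B replaces A's transpose-and-compare border state machine by intersecting the per-line
-- sets of '|' positions, and replaces A's per-group slicing by a single pointer walk over
-- each line that distributes its characters among the groups, dropping '|' on the fly
-- (objective: alternative).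

-- ===== PORT A =====
-- one step of A's loop over the columns of zip(*all_lines);
-- state = (border_indexes, curr_border, for_delete, zindex)
def pvStepA (n : Nat) (s : List Int × Bool × List Int × Int) (col : List Char) :
    List Int × Bool × List Int × Int :=
  let currB := decide (List.replicate n '|' = col)
  if currB && s.2.1 then (s.1, currB, s.2.2.1 ++ [s.2.2.2], s.2.2.2 + 1)
  else if currB && !s.2.1 then (s.1 ++ [s.2.2.2], currB, s.2.2.1, s.2.2.2 + 1)
  else (s.1, currB, s.2.2.1, s.2.2.2 + 1)

def detect_colums (all_lines : List String) : List String :=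
  let len_all_lines := all_lines.length
  -- zip(*all_lines): the columns, truncated at the shortest line (the ' ' default is never read)
  let cols : List (List Char) :=
    (List.range (((all_lines.map (fun l => l.toList.length)).min?).getD 0)).map
      (fun j => all_lines.map (fun l => l.toList.getD j ' '))
  let st := cols.foldl (pvStepA len_all_lines) ([], false, [], 0)
  let border_indexes := st.1
  let col_name_list : List (List String) :=
    (PySem.List.enumerate border_indexes).map (fun p =>
      let b_end : Option Int :=
        if p.1 + 1 = (border_indexes.length : Int) then none
        else some (PySem.List.pyGetD border_indexes (p.1 + 1) 0)
      all_lines.map (fun line => PySem.Str.slice line (some p.2) b_end))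
  col_name_list.map (fun i =>
    PySem.Str.replace (PySem.Str.strip (PySem.Str.replace (PySem.Str.join " " i) "|" "")) "_" " ")

-- ===== PORT B =====
-- {i for i, ch in enumerate(line) if ch == '|'}
def pvPipeSet (line : String) : PySem.Set Int :=
  PySem.Set.ofList
    (((PySem.List.enumerate line.toList).filter (fun p => p.2 == '|')).map (fun p => p.1))

-- one step of B's pointer walk over one line; state = (bufs, g)
def pvStepB (starts : List Int) (s : List (List Char) × Int) (p : Int × Char) :
    List (List Char) × Int :=
  let g := if s.2 + 1 < (starts.length : Int) ∧ PySem.List.pyGetD starts (s.2 + 1) 0 = p.1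
           then s.2 + 1 else s.2
  let bufs := if 0 ≤ g ∧ p.2 ≠ '|' then s.1.set g.toNat (s.1.getD g.toNat [] ++ [p.2]) else s.1
  (bufs, g)

def detect_colums_alt (all_lines : List String) : List String :=
  let pipe_sets : List (PySem.Set Int) := all_lines.map pvPipeSet
  let border : PySem.Set Int :=
    match pipe_sets with
    | [] => PySem.Set.empty
    | s :: rest => rest.foldl PySem.Set.inter s
  let starts : List Int :=
    PySem.List.sorted (border.filter (fun c => !(PySem.Set.contains border (c - 1)))) (fun x => x) false
  let groups0 : List (List (List Char)) := starts.map (fun _ => [])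
  let groups := all_lines.foldl (fun groups line =>
      let bufs0 : List (List Char) := starts.map (fun _ => [])
      let st := (PySem.List.enumerate line.toList).foldl (pvStepB starts) (bufs0, -1)
      (groups.zip st.1).map (fun q => q.1 ++ [q.2])) groups0
  groups.map (fun grp =>
    String.ofList (PySem.Chars.replace (PySem.Chars.strip (PySem.Chars.join [' '] grp)) ['_'] [' ']))

-- ===== PRECONDITION & SPEC =====
def Spec_detect_colums (all_lines : List String) (out : List String) : Prop := out = detect_colums_alt all_lines
instance (all_lines : List String) (out : List String) : Decidable (Spec_detect_colums all_lines out) := by unfold Spec_detect_colums; infer_instance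

-- ===== CLAIM (what is proved, stated in full; the proofs are below) =====
def Claim_equal_detect_colums : Prop := ∀ (all_lines : List String), Dom_detect_colums all_lines → Spec_detect_colums all_lines (detect_colums all_lines)

-- ===== LEMMAS AND PROOFS =====

-- shared vocabulary: minimum line width, full-border column, run start, run-start list
def pvW (L : List String) : Nat := ((L.map (fun l => l.toList.length)).min?).getD 0
def pvIsB (L : List String) (c : Nat) : Bool := L.all (fun l => l.toList.getD c ' ' == '|')
def pvP (L : List String) (c : Nat) : Bool := pvIsB L c && (c == 0 || !pvIsB L (c - 1))
def pvS (L : List String) : List Nat := (List.range (pvW L)).filter (pvP L)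

-- membership window of group j, and the characters a line contributes to group j
def pvWinB (S : List Nat) (j : Nat) (i : Int) : Bool :=
  decide ((S.getD j 0 : Int) ≤ i) && (decide (S.length ≤ j + 1) || decide (i < (S.getD (j+1) 0 : Int)))
def pvWin (S : List Nat) (cs : List Char) (j : Nat) : List Char :=
  ((PySem.List.enumerate cs 0).filter (fun p => pvWinB S j p.1 && !(p.2 == '|'))).map (·.2)

-- ---------- A side: the column state machine ----------

lemma pvIsB_eq (L : List String) (j : Nat) :
    decide (List.replicate L.length '|' = L.map (fun l => l.toList.getD j ' ')) = pvIsB L j := by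
  by_cases hb : ∀ l ∈ L, l.toList.getD j ' ' = '|'
  · have h1 : List.replicate L.length '|' = L.map (fun l => l.toList.getD j ' ') := by
      rw [eq_comm, List.eq_replicate_iff]; simpa using hb
    have h2 : pvIsB L j = true := by simp only [pvIsB, List.all_eq_true]; simpa using hb
    rw [decide_eq_true h1, h2]
  · have h1 : ¬ (List.replicate L.length '|' = L.map (fun l => l.toList.getD j ' ')) := by
      rw [eq_comm, List.eq_replicate_iff]; simpa using hb
    have h2 : pvIsB L j = false := by
      cases hbb : pvIsB L j
      · rfl
      · exfalso; apply hb; simp only [pvIsB, List.all_eq_true] at hbb; simpa using hbb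
    rw [decide_eq_false h1, h2]

lemma pvFold_spec (L : List String) (k : Nat) :
    ∃ fd, ((List.range k).map (fun j => L.map (fun l => l.toList.getD j ' '))).foldl
        (pvStepA L.length) ([], false, [], 0)
      = (((List.range k).filter (pvP L)).map Int.ofNat,
         (if k = 0 then false else pvIsB L (k - 1)), fd, (k : Int)) := by
  induction k with
  | zero => exact ⟨[], rfl⟩
  | succ k ih =>
    obtain ⟨fd, ih⟩ := ih
    rw [List.range_succ, List.map_append, List.foldl_append, ih]
    simp only [List.map_cons, List.map_nil, List.foldl_cons, List.foldl_nil]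
    rw [List.filter_append]
    unfold pvStepA
    simp only [pvIsB_eq]
    by_cases hb : pvIsB L k
    · by_cases hk : k = 0
      · subst hk
        exact ⟨fd, by simp [pvP, hb]⟩
      · simp only [if_neg hk]
        by_cases hp : pvIsB L (k - 1)
        · refine ⟨fd ++ [(k : Int)], ?_⟩
          have hP : pvP L k = false := by simp [pvP, hb, hp, hk]
          simp [hb, hp, hP]
        · refine ⟨fd, ?_⟩
          have hP : pvP L k = true := by simp [pvP, hb, hp]
          simp [hb, hp, hP]
    · refine ⟨fd, ?_⟩
      have hP : pvP L k = false := by simp [pvP, hb]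
      by_cases hk : k = 0
      · subst hk; simp [hb, hP]
      · simp [hb, hP, hk]

-- ---------- replace/strip/join plumbing ----------

lemma pvRep_go (x : Char) : ∀ (fuel : Nat) (l acc : List Char), l.length ≤ fuel →
    PySem.Chars.replace.go [x] [] fuel l acc = acc.reverse ++ l.filter (· != x) := by
  intro fuel
  induction fuel with
  | zero =>
    intro l acc h
    have : l = [] := List.eq_nil_of_length_eq_zero (by omega)
    subst this; simp [PySem.Chars.replace.go]
  | succ n ih =>
    intro l acc h
    cases l with
    | nil => simp [PySem.Chars.replace.go]
    | cons c t =>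
      simp only [PySem.Chars.replace.go]
      by_cases hc : c = x
      · subst hc
        simp only [List.isPrefixOf, BEq.rfl, Bool.true_and, if_true]
        have := ih (List.drop [c].length (c :: t)) ([].reverse ++ acc) (by simpa using h)
        simp only [List.length_cons, List.length_nil, List.drop_succ_cons, List.drop_zero] at this ⊢
        rw [this]; simp
      · have hpre : [x].isPrefixOf (c :: t) = false := by
          simp [List.isPrefixOf]; exact fun hx => absurd hx.symm hc
        rw [hpre]
        simp only [Bool.false_eq_true, if_false]
        rw [ih t _ (by simpa using h)]
        simp [hc]

lemma pvReplace_filter (x : Char) (cs : List Char) :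
    PySem.Chars.replace cs [x] [] = cs.filter (· != x) := by
  rw [PySem.Chars.replace]
  simp only [List.isEmpty_cons, Bool.false_eq_true, if_false]
  rw [pvRep_go x cs.length cs [] le_rfl]; rfl

lemma pvFilter_join (parts : List (List Char)) :
    (PySem.Chars.join [' '] parts).filter (· != '|')
      = PySem.Chars.join [' '] (parts.map (List.filter (· != '|'))) := by
  induction parts with
  | nil => rfl
  | cons p rest ih =>
    cases rest with
    | nil => simp [PySem.Chars.join_singleton]
    | cons q r =>
      rw [PySem.Chars.join_cons_cons, List.map_cons, List.map_cons, PySem.Chars.join_cons_cons,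
        List.filter_append, List.filter_append]
      rw [← List.map_cons, ih]
      simp

-- ---------- enumerate windows are slices ----------

lemma pvEnumShift {α : Type} (xs : List α) (s : Int) :
    PySem.List.enumerate xs (s + 1) = (PySem.List.enumerate xs s).map (fun p => (p.1 + 1, p.2)) := by
  induction xs generalizing s with
  | nil => simp [PySem.List.enumerate_nil]
  | cons c t ih => rw [PySem.List.enumerate_cons, PySem.List.enumerate_cons, ih]; simp

lemma pvMapSndShift (l : List (Int × Char)) :
    List.map (fun x : Int × Char => x.2) (List.map (fun p : Int × Char => (p.1 + 1, p.2)) l)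
      = List.map (fun x => x.2) l := by
  rw [List.map_map]; rfl

lemma pvE1 (cs : List Char) : ∀ (a b : Int),
    ((PySem.List.enumerate cs 0).filter (fun p => decide (a ≤ p.1) && decide (p.1 < b))).map (·.2)
      = (cs.drop a.toNat).take (b.toNat - a.toNat) := by
  induction cs with
  | nil => intro a b; simp [PySem.List.enumerate_nil]
  | cons c t ih =>
    intro a b
    rw [PySem.List.enumerate_cons, (by norm_num : (0:Int) + 1 = 0 + 1), pvEnumShift]
    have hcomp : (List.filter ((fun p : Int × Char => decide (a ≤ p.1) && decide (p.1 < b)) ∘ fun p => (p.1 + 1, p.2))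
        (PySem.List.enumerate t 0)) = (PySem.List.enumerate t 0).filter
        (fun p => decide (a - 1 ≤ p.1) && decide (p.1 < b - 1)) := by
      apply List.filter_congr; intro p _
      simp only [Function.comp]; congr 1 <;> · simp; try omega
    simp only [List.filter_cons, List.filter_map, hcomp]
    by_cases ha : a ≤ 0
    · by_cases hb : 0 < b
      · simp only [decide_eq_true ha, decide_eq_true hb, Bool.and_self, if_true, List.map_cons]
        rw [pvMapSndShift, ih (a-1) (b-1)]
        have h1 : a.toNat = 0 := by omega
        have h2 : (a-1).toNat = 0 := by omega
        have h3 : (b-1).toNat = b.toNat - 1 := by omega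
        rw [h1, h2, h3]
        simp only [List.drop_zero]
        have h4 : b.toNat - 0 = (b.toNat - 1 - 0) + 1 := by omega
        rw [h4, List.take_succ_cons]
      · have hb' : decide (0 < b) = false := by simpa using hb
        simp only [hb', Bool.and_false, Bool.false_eq_true, if_false]
        rw [pvMapSndShift, ih (a-1) (b-1)]
        have h2 : b.toNat - a.toNat = 0 := by omega
        have h3 : (b-1).toNat - (a-1).toNat = 0 := by omega
        rw [h3, h2]; simp
    · have ha' : decide (a ≤ 0) = false := by simpa using ha
      simp only [ha', Bool.false_and, Bool.false_eq_true, if_false]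
      rw [pvMapSndShift, ih (a-1) (b-1)]
      have h1 : a.toNat = (a-1).toNat + 1 := by omega
      have h3 : (b-1).toNat - (a-1).toNat = b.toNat - a.toNat := by omega
      rw [h1, List.drop_succ_cons, h3]
      congr 1; omega

lemma pvE2 (cs : List Char) : ∀ (a : Int),
    ((PySem.List.enumerate cs 0).filter (fun p => decide (a ≤ p.1))).map (·.2) = cs.drop a.toNat := by
  induction cs with
  | nil => intro a; simp [PySem.List.enumerate_nil]
  | cons c t ih =>
    intro a
    rw [PySem.List.enumerate_cons, (by norm_num : (0:Int) + 1 = 0 + 1), pvEnumShift]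
    have hcomp : (List.filter ((fun p : Int × Char => decide (a ≤ p.1)) ∘ fun p => (p.1 + 1, p.2))
        (PySem.List.enumerate t 0)) = (PySem.List.enumerate t 0).filter
        (fun p => decide (a - 1 ≤ p.1)) := by
      apply List.filter_congr; intro p _
      simp only [Function.comp]; congr 1; simp
    simp only [List.filter_cons, List.filter_map, hcomp]
    by_cases ha : a ≤ 0
    · simp only [decide_eq_true ha, if_true, List.map_cons]
      rw [pvMapSndShift, ih (a-1)]
      have h1 : a.toNat = 0 := by omega
      have h2 : (a-1).toNat = 0 := by omega
      simp [h1, h2]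
    · have ha' : decide (a ≤ 0) = false := by simpa using ha
      simp only [ha', Bool.false_eq_true, if_false]
      rw [pvMapSndShift, ih (a-1)]
      have h1 : a.toNat = (a-1).toNat + 1 := by omega
      rw [h1, List.drop_succ_cons]

-- ---------- sorted-count facts and the pointer walk ----------

lemma pvCnt_succ (S : List Nat) (s : Nat) :
    S.countP (fun x => decide (x < s + 1)) = S.countP (fun x => decide (x ≤ s)) := by
  apply List.countP_congr; intro x _; simp

lemma pvC3 (S : List Nat) (hn : S.Nodup) (s : Nat) :
    S.countP (fun x => decide (x ≤ s)) = S.countP (fun x => decide (x < s)) + (if s ∈ S then 1 else 0) := by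
  induction S with
  | nil => simp
  | cons a t ih =>
    have hn' := hn.of_cons
    have hna : a ∉ t := by simp at hn; exact hn.1
    by_cases has : a = s
    · subst has
      rw [List.countP_cons_of_pos (by simp), List.countP_cons_of_neg (by simp), ih hn']
      simp [hna]
    · have hsa : s ≠ a := Ne.symm has
      by_cases hle : a ≤ s
      · have hlt : a < s := by omega
        rw [List.countP_cons_of_pos (by simpa using hle), List.countP_cons_of_pos (by simpa using hlt), ih hn']
        by_cases hm : s ∈ t <;> simp [List.mem_cons, hm, hsa]
      · rw [List.countP_cons_of_neg (by simpa using hle), List.countP_cons_of_neg (by simp; omega), ih hn']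
        by_cases hm : s ∈ t <;> simp [List.mem_cons, hm, hsa]

lemma pvC1 (S : List Nat) (h : S.Pairwise (· < ·)) (s : Nat) :
    (S.countP (fun x => decide (x < s)) < S.length ∧ S.getD (S.countP (fun x => decide (x < s))) 0 = s)
      ↔ s ∈ S := by
  induction S with
  | nil => simp
  | cons a t ih =>
    have hat : ∀ x ∈ t, a < x := fun x hx => (List.pairwise_cons.mp h).1 x hx
    have ht := (List.pairwise_cons.mp h).2
    by_cases has : a < s
    · rw [List.countP_cons_of_pos (by simpa using has)]
      simp only [List.length_cons, List.getD_cons_succ, List.mem_cons]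
      rw [show (List.countP (fun x => decide (x < s)) t + 1 < t.length + 1) = (List.countP (fun x => decide (x < s)) t < t.length) from by simp]
      rw [ih ht]
      have : ¬ s = a := by omega
      simp [this]
    · rw [List.countP_cons_of_neg (by simpa using has)]
      have hcnt : t.countP (fun x => decide (x < s)) = 0 := by
        rw [List.countP_eq_zero]
        intro x hx; have := hat x hx; simp; omega
      rw [hcnt]
      simp only [List.length_cons, List.getD_cons_zero, List.mem_cons]
      constructor
      · intro ⟨_, h2⟩; exact Or.inl h2.symm
      · intro hm
        rcases hm with hm | hm
        · exact ⟨by omega, hm.symm⟩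
        · exact absurd (hat s hm) (by omega)

lemma pvC2 (S : List Nat) (h : S.Pairwise (· < ·)) (j : Nat) (hj : j < S.length) (s : Nat) :
    (pvWinB S j (s : Int) = true) ↔ S.countP (fun x => decide (x ≤ s)) = j + 1 := by
  induction S generalizing j with
  | nil => simp at hj
  | cons a t ih =>
    have hat : ∀ x ∈ t, a < x := fun x hx => (List.pairwise_cons.mp h).1 x hx
    have ht := (List.pairwise_cons.mp h).2
    by_cases has : a ≤ s
    · rw [List.countP_cons_of_pos (by simpa using has)]
      cases j with
      | zero =>
        simp only [pvWinB, List.getD_cons_zero, List.getD_cons_succ, List.length_cons]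
        have hcnt0 : t.countP (fun x => decide (x ≤ s)) = 0 ↔ (∀ x ∈ t, s < x) := by
          rw [List.countP_eq_zero]
          constructor
          · intro hh x hx; have := hh x hx; simp at this; omega
          · intro hh x hx; have := hh x hx; simp; omega
        constructor
        · intro hw
          simp only [Bool.and_eq_true, Bool.or_eq_true, decide_eq_true_eq] at hw
          have : t.countP (fun x => decide (x ≤ s)) = 0 := by
            rcases hw.2 with hlen | hlt
            · have : t = [] := by cases t <;> simp_all
              simp [this]
            · cases t with
              | nil => simp
              | cons b u =>
                simp only [List.getD_cons_zero] at hlt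
                rw [hcnt0]
                intro x hx
                rcases List.mem_cons.mp hx with hx | hx
                · subst hx; omega
                · have hbu := (List.pairwise_cons.mp ht).1 x hx; omega
          omega
        · intro hc
          have hcnt : t.countP (fun x => decide (x ≤ s)) = 0 := by omega
          simp only [Bool.and_eq_true, Bool.or_eq_true, decide_eq_true_eq]
          refine ⟨by exact_mod_cast has, ?_⟩
          cases t with
          | nil => left; simp
          | cons b u =>
            right
            simp only [List.getD_cons_zero]
            have := (hcnt0.mp hcnt) b (by simp)
            exact_mod_cast by omega
      | succ m =>
        have hm : m < t.length := by simpa using hj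
        have hrec := ih ht m hm
        simp only [pvWinB] at hrec ⊢
        simp only [List.getD_cons_succ, List.length_cons]
        have hiff : (t.length + 1 ≤ m + 1 + 1) = (t.length ≤ m + 1) := propext (by omega)
        simp only [hiff]
        rw [hrec]
        omega
    · rw [List.countP_cons_of_neg (by simpa using has)]
      have hcnt : t.countP (fun x => decide (x ≤ s)) = 0 := by
        rw [List.countP_eq_zero]
        intro x hx; have := hat x hx; simp; omega
      rw [hcnt]
      constructor
      · intro hw
        exfalso
        simp only [pvWinB, Bool.and_eq_true, decide_eq_true_eq] at hw
        have hget : (a :: t).getD j 0 = (a :: t)[j] := List.getD_eq_getElem _ _ hj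
        have hmem : (a :: t)[j] ∈ a :: t := List.getElem_mem _
        rw [hget] at hw
        rcases List.mem_cons.mp hmem with hg | hg
        · rw [hg] at hw; omega
        · have := hat _ hg; omega
      · omega

lemma pvGetDSet (l : List (List Char)) (i j : Nat) (v : List Char) (hj : j < l.length) :
    (l.set i v).getD j [] = if j = i then v else l.getD j [] := by
  rw [List.getD_eq_getElem _ _ (by simpa using hj), List.getElem_set]
  split_ifs with h1 h2 h2
  · rfl
  · exact absurd h1.symm h2
  · exact absurd h2.symm h1
  · rw [List.getD_eq_getElem _ _ hj]

lemma pvWalk (S : List Nat) (h : S.Pairwise (· < ·)) :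
    ∀ (cs : List Char) (s : Nat) (bufs : List (List Char)), bufs.length = S.length →
    (PySem.List.enumerate cs (s : Int)).foldl (pvStepB (S.map Int.ofNat))
        (bufs, (S.countP (fun x => decide (x < s)) : Int) - 1)
      = ((List.range S.length).map (fun j => bufs.getD j [] ++
            ((PySem.List.enumerate cs (s : Int)).filter
              (fun p => pvWinB S j p.1 && !(p.2 == '|'))).map (·.2)),
         (S.countP (fun x => decide (x < s + cs.length)) : Int) - 1) := by
  intro cs
  induction cs with
  | nil =>
    intro s bufs hb
    simp only [PySem.List.enumerate_nil, List.foldl_nil, List.filter_nil, List.map_nil,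
      List.append_nil, List.length_nil, Nat.add_zero]
    congr 1
    apply List.ext_getElem
    · simp [hb]
    · intro i h1 h2
      simp only [List.getElem_map, List.getElem_range]
      exact (List.getD_eq_getElem bufs [] (by simpa [hb] using h2)).symm
  | cons c t ih =>
    intro s bufs hb
    set cnt := S.countP (fun x => decide (x < s)) with hcnt
    have hm_def : S.countP (fun x => decide (x ≤ s)) = cnt + (if s ∈ S then 1 else 0) :=
      pvC3 S (h.nodup) s
    set m := S.countP (fun x => decide (x ≤ s)) with hm
    have hcle : cnt ≤ m := by omega
    have hmlen : m ≤ S.length := hm ▸ List.countP_le_length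
    have hcast : ((s : Int) + 1) = ((s + 1 : Nat) : Int) := by push_cast; ring
    rw [PySem.List.enumerate_cons, List.foldl_cons]
    -- the step
    have hstep : pvStepB (S.map Int.ofNat) (bufs, (cnt : Int) - 1) ((s : Int), c)
        = (if 1 ≤ m ∧ c ≠ '|'
           then bufs.set (m - 1) (bufs.getD (m - 1) [] ++ [c]) else bufs, (m : Int) - 1) := by
      have hcond : ((cnt : Int) - 1 + 1 < ((S.map Int.ofNat).length : Int) ∧
          PySem.List.pyGetD (S.map Int.ofNat) ((cnt : Int) - 1 + 1) 0 = (s : Int))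
          ↔ s ∈ S := by
        have h1 : (cnt : Int) - 1 + 1 = (cnt : Int) := by ring
        rw [h1]
        simp only [List.length_map]
        constructor
        · intro ⟨hl, hg⟩
          have hl' : cnt < S.length := by exact Int.ofNat_lt.mp hl
          rw [PySem.List.pyGetD_natCast] at hg
          have : (S.map Int.ofNat).getD cnt 0 = ((S.getD cnt 0 : Nat) : Int) := by
            rw [List.getD_eq_getElem _ _ (by rw [List.length_map]; exact hl'), List.getD_eq_getElem _ _ hl']
            simp
          rw [this] at hg
          exact (pvC1 S h s).mp ⟨hl', by exact_mod_cast hg⟩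
        · intro hmem
          have := (pvC1 S h s).mpr hmem
          refine ⟨Int.ofNat_lt.mpr this.1, ?_⟩
          rw [PySem.List.pyGetD_natCast]
          rw [List.getD_eq_getElem _ _ (by rw [List.length_map]; exact this.1)]
          simp only [List.getElem_map]
          rw [List.getD_eq_getElem _ _ this.1] at this
          exact_mod_cast congrArg Int.ofNat this.2
      by_cases hmem : s ∈ S
      · have hme : m = cnt + 1 := by simp [hmem] at hm_def; omega
        simp only [pvStepB, if_pos (hcond.mpr hmem)]
        have hg1 : (cnt : Int) - 1 + 1 = ((m : Int)) - 1 := by omega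
        rw [hg1]
        have h0m : (0 ≤ (m : Int) - 1) ↔ (1 ≤ m) := by omega
        have htn : ((m : Int) - 1).toNat = m - 1 := by omega
        by_cases hc : c = '|'
        · simp [hc]
        · by_cases h1m : 1 ≤ m <;> simp [hc, h0m, htn, h1m]
      · have hme : m = cnt := by simp [hmem] at hm_def; omega
        have : ¬ ((cnt : Int) - 1 + 1 < ((S.map Int.ofNat).length : Int) ∧
            PySem.List.pyGetD (S.map Int.ofNat) ((cnt : Int) - 1 + 1) 0 = (s : Int)) := by
          rw [hcond]; exact hmem
        simp only [pvStepB, if_neg this]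
        have h0m : (0 ≤ (cnt : Int) - 1) ↔ (1 ≤ m) := by omega
        have htn : ((cnt : Int) - 1).toNat = m - 1 := by omega
        rw [hme] at *
        by_cases hc : c = '|'
        · simp [hc]
        · by_cases h1m : 1 ≤ m <;> simp [hc, htn, h1m]
    rw [hstep]
    set bufs' := if 1 ≤ m ∧ c ≠ '|' then bufs.set (m - 1) (bufs.getD (m - 1) [] ++ [c]) else bufs with hbufs'
    have hb' : bufs'.length = S.length := by
      rw [hbufs']; split_ifs <;> simp [hb]
    have hmid : (m : Int) - 1 = (S.countP (fun x => decide (x < s + 1)) : Int) - 1 := by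
      rw [pvCnt_succ]
    rw [hcast, hmid, ih (s+1) bufs' hb']
    have hlen : s + 1 + t.length = s + (c :: t).length := by simp; omega
    rw [hlen]
    congr 1
    apply List.map_congr_left
    intro j hj
    have hjlen : j < S.length := List.mem_range.mp hj
    rw [List.filter_cons]
    by_cases hwin : (pvWinB S j (s : Int) && !(c == '|')) = true
    · have hwand := (Bool.and_eq_true _ _).mp hwin
      have hw := (pvC2 S h j hjlen s).mp hwand.1
      have hcne : ¬ (c = '|') := by simpa using hwand.2
      have hjm : j = m - 1 := by omega
      have h1m : 1 ≤ m := by omega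
      have hbv : bufs'.getD j [] = bufs.getD j [] ++ [c] := by
        rw [hbufs', if_pos ⟨h1m, hcne⟩, pvGetDSet _ _ _ _ (by rw [hb]; exact hjlen), if_pos hjm, hjm]
      rw [if_pos hwin, hbv]
      simp [List.append_assoc]
    · have hbv : bufs'.getD j [] = bufs.getD j [] := by
        rw [hbufs']
        split_ifs with hsp
        · -- update happened at m-1; show j ≠ m-1
          have hjm : j ≠ m - 1 := by
            intro hjeq
            apply hwin
            have hwj : pvWinB S j (s : Int) = true := by
              rw [pvC2 S h j hjlen s]; omega
            have : (c == '|') = false := by simpa using hsp.2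
            simp [hwj, this]
          rw [pvGetDSet _ _ _ _ (by rw [hb]; exact hjlen), if_neg hjm]
        · rfl
      rw [if_neg (by simpa using hwin), hbv]

-- ---------- B side: border set and run starts ----------

lemma pvPipeList_pairwise (cs : List Char) :
    (((PySem.List.enumerate cs 0).filter (fun p => p.2 == '|')).map (fun p => p.1)).Pairwise (· < ·) :=
  ((PySem.List.pairwise_lt_enumerate cs 0).filter _).map _ (fun _ _ h => h)

lemma pvPipeSet_eq (line : String) :
    pvPipeSet line = ((PySem.List.enumerate line.toList).filter (fun p => p.2 == '|')).map (fun p => p.1) :=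
  PySem.Set.ofList_eq_self_of_nodup _ ((pvPipeList_pairwise line.toList).nodup)

lemma pvPipeSet_mem (line : String) (x : Int) :
    x ∈ pvPipeSet line ↔ ∃ k : Nat, k < line.toList.length ∧ x = k ∧ line.toList.getD k ' ' = '|' := by
  rw [pvPipeSet_eq]
  simp only [List.mem_map, List.mem_filter, PySem.List.mem_enumerate_iff]
  constructor
  · rintro ⟨p, ⟨⟨k, hk, hp⟩, hpipe⟩, hx⟩
    subst hp
    refine ⟨k, hk, by simpa using hx.symm, ?_⟩
    rw [List.getD_eq_getElem _ _ hk]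
    simpa using hpipe
  · rintro ⟨k, hk, hx, hc⟩
    refine ⟨((k : Int), line.toList[k]), ⟨⟨k, hk, by simp⟩, ?_⟩, by simp [hx]⟩
    rw [List.getD_eq_getElem _ _ hk] at hc
    simpa using hc

lemma pvFoldInter_sublist : ∀ (rest : List (PySem.Set Int)) (s : PySem.Set Int),
    (rest.foldl PySem.Set.inter s).Sublist s := by
  intro rest
  induction rest with
  | nil => intro s; exact List.Sublist.refl s
  | cons t r ih =>
    intro s
    exact (ih (PySem.Set.inter s t)).trans List.filter_sublist

lemma pvFoldInter_mem : ∀ (rest : List (PySem.Set Int)) (s : PySem.Set Int) (x : Int),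
    x ∈ rest.foldl PySem.Set.inter s ↔ x ∈ s ∧ ∀ t ∈ rest, x ∈ t := by
  intro rest
  induction rest with
  | nil => intro s x; simp
  | cons t r ih =>
    intro s x
    rw [List.foldl_cons, ih, PySem.Set.mem_inter]
    simp only [List.mem_cons]
    constructor
    · rintro ⟨⟨h1, h2⟩, h3⟩
      refine ⟨h1, fun u hu => ?_⟩
      rcases hu with hu | hu
      · subst hu; exact h2
      · exact h3 u hu
    · rintro ⟨h1, h2⟩
      exact ⟨⟨h1, h2 t (Or.inl rfl)⟩, fun u hu => h2 u (Or.inr hu)⟩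

lemma pvW_spec (l0 : String) (rest : List String) :
    (∀ line ∈ l0 :: rest, pvW (l0 :: rest) ≤ line.toList.length)
      ∧ ∃ line ∈ l0 :: rest, pvW (l0 :: rest) = line.toList.length := by
  have hne : ((l0 :: rest).map (fun l => l.toList.length)) ≠ [] := by simp
  rcases hm : ((l0 :: rest).map (fun l => l.toList.length)).min? with _ | m
  · exact absurd (List.min?_eq_none_iff.mp hm) hne
  · have hmem := List.min?_mem hm
    have hle : ∀ b ∈ ((l0 :: rest).map (fun l => l.toList.length)), m ≤ b := (List.le_min?_iff hm).mp le_rfl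
    have hw : pvW (l0 :: rest) = m := by rw [pvW, hm]; rfl
    rw [hw]
    constructor
    · intro line hline
      exact hle _ (List.mem_map_of_mem hline)
    · rcases List.mem_map.mp hmem with ⟨line, hline, hlen⟩
      exact ⟨line, hline, hlen.symm⟩

lemma pvBorder_mem (l0 : String) (rest : List String) (x : Int) :
    x ∈ (rest.map pvPipeSet).foldl PySem.Set.inter (pvPipeSet l0)
      ↔ ∃ c : Nat, x = c ∧ c < pvW (l0 :: rest) ∧ pvIsB (l0 :: rest) c = true := by
  rw [pvFoldInter_mem]
  have hall : (x ∈ pvPipeSet l0 ∧ ∀ t ∈ rest.map pvPipeSet, x ∈ t)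
      ↔ ∀ line ∈ l0 :: rest, x ∈ pvPipeSet line := by
    simp only [List.mem_map, List.mem_cons]
    constructor
    · rintro ⟨h0, hr⟩ line hline
      rcases hline with hline | hline
      · subst hline; exact h0
      · exact hr _ ⟨line, hline, rfl⟩
    · intro hl
      exact ⟨hl l0 (Or.inl rfl), by rintro t ⟨line, hline, rfl⟩; exact hl line (Or.inr hline)⟩
  rw [hall]
  obtain ⟨hWle, line₀, hline₀, hWeq⟩ := pvW_spec l0 rest
  constructor
  · intro hl
    obtain ⟨k, hk, hx, hc⟩ := (pvPipeSet_mem l0 x).mp (hl l0 (List.mem_cons_self))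
    refine ⟨k, hx, ?_, ?_⟩
    · obtain ⟨k', hk', hx', _⟩ := (pvPipeSet_mem line₀ x).mp (hl line₀ hline₀)
      have hkk : (k : Int) = (k' : Int) := by rw [← hx, hx']
      have : k = k' := by exact_mod_cast hkk
      rw [hWeq]; omega
    · rw [pvIsB, List.all_eq_true]
      intro line hline
      obtain ⟨k', hk', hx', hc'⟩ := (pvPipeSet_mem line x).mp (hl line hline)
      have hkk : (k : Int) = k' := by rw [← hx, hx']
      have : k = k' := by exact_mod_cast hkk
      subst this
      simpa using hc'
  · rintro ⟨c, hx, hcw, hisb⟩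
    intro line hline
    rw [pvPipeSet_mem]
    have hlen : c < line.toList.length := lt_of_lt_of_le hcw (hWle line hline)
    refine ⟨c, hlen, hx, ?_⟩
    rw [pvIsB, List.all_eq_true] at hisb
    simpa using hisb line hline

lemma pvStarts_eq (l0 : String) (rest : List String) :
    PySem.List.sorted
        (((rest.map pvPipeSet).foldl PySem.Set.inter (pvPipeSet l0)).filter
          (fun c => !(PySem.Set.contains ((rest.map pvPipeSet).foldl PySem.Set.inter (pvPipeSet l0)) (c - 1))))
        (fun x => x) false
      = (pvS (l0 :: rest)).map Int.ofNat := by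
  set border := (rest.map pvPipeSet).foldl PySem.Set.inter (pvPipeSet l0) with hb
  set fq := border.filter (fun c => !(PySem.Set.contains border (c - 1))) with hfq
  have hbp : border.Pairwise (· < ·) :=
    ((pvPipeSet_eq l0) ▸ pvPipeList_pairwise l0.toList).sublist (pvFoldInter_sublist _ _)
  have hfp : fq.Pairwise (· < ·) := hbp.filter _
  have hsorted : PySem.List.sorted fq (fun x => x) false = fq :=
    PySem.List.sorted_eq_of_perm_of_pairwise_lt fq fq (fun x => x) (List.Perm.refl fq) hfp
  rw [hsorted]
  -- both sides strictly increasing with the same members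
  have hrp : ((pvS (l0 :: rest)).map Int.ofNat).Pairwise (· < ·) :=
    ((List.pairwise_lt_range.filter _).map _ (fun a b h => Int.ofNat_lt.mpr h))
  have hmem : ∀ x, x ∈ fq ↔ x ∈ (pvS (l0 :: rest)).map Int.ofNat := by
    intro x
    rw [hfq, List.mem_filter]
    have hc1 : (!(PySem.Set.contains border (x - 1))) = true ↔ ¬ ((x - 1) ∈ border) := by
      simp
    rw [hc1, pvBorder_mem, pvBorder_mem]
    simp only [List.mem_map, pvS, List.mem_filter, List.mem_range]
    constructor
    · rintro ⟨⟨c, hx, hcw, hisb⟩, hnb⟩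
      refine ⟨c, ⟨hcw, ?_⟩, by exact_mod_cast hx.symm⟩
      rw [pvP, Bool.and_eq_true]
      refine ⟨hisb, ?_⟩
      rw [Bool.or_eq_true]
      by_cases hc0 : c = 0
      · left; simp [hc0]
      · right
        simp only [Bool.not_eq_true']
        by_contra hprev
        simp only [Bool.not_eq_false] at hprev
        exact hnb ⟨c - 1, by omega, by omega, hprev⟩
    · rintro ⟨c, ⟨hcw, hp⟩, hx⟩
      have hxc : (c : Int) = x := by exact_mod_cast hx
      rw [pvP, Bool.and_eq_true, Bool.or_eq_true] at hp
      refine ⟨⟨c, hxc.symm, hcw, hp.1⟩, ?_⟩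
      rintro ⟨c', hx', hcw', hisb'⟩
      rcases hp.2 with h0 | hnp
      · have : c = 0 := by simpa using h0
        omega
      · have hcc : c' = c - 1 := by omega
        subst hcc
        have hc0 : c ≠ 0 := by omega
        rw [Bool.not_eq_true'] at hnp
        rw [hisb'] at hnp
        exact Bool.noConfusion hnp
  have hperm := (List.perm_ext_iff_of_nodup hfp.nodup hrp.nodup).mpr hmem
  exact hperm.eq_of_pairwise (fun a b _ _ h1 h2 => absurd h2 (lt_asymm h1)) hfp hrp

-- ---------- assembling the groups ----------

lemma pvGetDConst {α : Type} (l : List α) (j : Nat) :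
    (l.map (fun _ => ([] : List Char))).getD j [] = [] := by
  rw [List.getD_eq_getElem?_getD, List.getElem?_map]
  cases l[j]? <;> rfl

lemma pvTrans (n : Nat) (f : String → Nat → List Char) :
    ∀ (L : List String) (g : Nat → List (List Char)),
    L.foldl (fun G line => (G.zip ((List.range n).map (fun j => f line j))).map (fun q => q.1 ++ [q.2]))
        ((List.range n).map g)
      = (List.range n).map (fun j => g j ++ L.map (fun line => f line j)) := by
  intro L
  induction L with
  | nil => intro g; simp
  | cons line L' ih =>
    intro g
    rw [List.foldl_cons, List.zip_map', List.map_map]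
    have hstep : (List.map ((fun q : List (List Char) × List Char => q.1 ++ [q.2]) ∘ fun j => (g j, f line j)) (List.range n))
        = (List.range n).map (fun j => g j ++ [f line j]) := rfl
    rw [hstep, ih (fun j => g j ++ [f line j])]
    apply List.map_congr_left
    intro j _
    simp [List.append_assoc]

-- ---------- each window is a filtered slice ----------

lemma pvWinEq_mid (S : List Nat) (cs : List Char) (j : Nat) (hj : j + 1 < S.length) :
    pvWin S cs j
      = (PySem.List.slice cs (some (S.getD j 0 : Int)) (some (S.getD (j+1) 0 : Int))).filter (· != '|') := by
  have hlen : (decide (S.length ≤ j + 1) : Bool) = false := by simp; omega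
  have hpred : (fun p : Int × Char => pvWinB S j p.1 && !(p.2 == '|'))
      = (fun p : Int × Char => ((fun c => c != '|') ∘ (fun q : Int × Char => q.2)) p
          && (decide ((S.getD j 0 : Int) ≤ p.1) && decide (p.1 < (S.getD (j+1) 0 : Int)))) := by
    funext p
    simp only [pvWinB, hlen, Bool.false_or, Function.comp]
    rw [Bool.and_comm]
    rfl
  rw [pvWin, hpred, ← List.filter_filter, ← List.filter_map, pvE1]
  rw [PySem.List.slice_natCast]
  simp

lemma pvWinEq_last (S : List Nat) (cs : List Char) (j : Nat) (hj : j + 1 = S.length) :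
    pvWin S cs j = (PySem.List.slice cs (some (S.getD j 0 : Int)) none).filter (· != '|') := by
  have hlen : (decide (S.length ≤ j + 1) : Bool) = true := by simp [hj]
  have hpred : (fun p : Int × Char => pvWinB S j p.1 && !(p.2 == '|'))
      = (fun p : Int × Char => ((fun c => c != '|') ∘ (fun q : Int × Char => q.2)) p
          && decide ((S.getD j 0 : Int) ≤ p.1)) := by
    funext p
    simp only [pvWinB, hlen, Bool.true_or, Bool.and_true, Function.comp]
    rw [Bool.and_comm]
    rfl
  rw [pvWin, hpred, ← List.filter_filter, ← List.filter_map, pvE2]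
  rw [PySem.List.slice_from cs (by positivity)]

lemma pvCell (L : List String) (S : List Nat) (i : Nat) (hi : i < S.length) :
    PySem.Str.replace (PySem.Str.strip (PySem.Str.replace (PySem.Str.join " "
        (L.map (fun line => PySem.Str.slice line (some (Int.ofNat (S[i]'hi)))
          (if (0 : Int) + ↑i + 1 = ((S.map Int.ofNat).length : Int) then none
           else some (PySem.List.pyGetD (S.map Int.ofNat) ((0 : Int) + ↑i + 1) 0))))) "|" "")) "_" " "
      = String.ofList (PySem.Chars.replace (PySem.Chars.strip (PySem.Chars.join [' ']
          (L.map (fun line => pvWin S line.toList i)))) ['_'] [' ']) := by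
  set e : Option Int := (if (0 : Int) + ↑i + 1 = ((S.map Int.ofNat).length : Int) then none
           else some (PySem.List.pyGetD (S.map Int.ofNat) ((0 : Int) + ↑i + 1) 0)) with he
  have hwin : ∀ line : String,
      (PySem.List.slice line.toList (some (Int.ofNat (S[i]'hi))) e).filter (· != '|')
        = pvWin S line.toList i := by
    intro line
    by_cases hlast : i + 1 = S.length
    · have hcond : (0 : Int) + ↑i + 1 = ((S.map Int.ofNat).length : Int) := by
        simp only [List.length_map]
        omega
      have he' : e = none := by rw [he, if_pos hcond]
      rw [he', pvWinEq_last S line.toList i hlast, List.getD_eq_getElem _ _ hi]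
      rfl
    · have hmid : i + 1 < S.length := by omega
      have hcond : ¬ ((0 : Int) + ↑i + 1 = ((S.map Int.ofNat).length : Int)) := by
        simp only [List.length_map]
        omega
      have harg : (0 : Int) + ↑i + 1 = ((i + 1 : Nat) : Int) := by push_cast; ring
      have he' : e = some (Int.ofNat (S[i+1]'hmid)) := by
        rw [he, if_neg hcond, harg, PySem.List.pyGetD_natCast,
          List.getD_eq_getElem _ _ (by simpa using hmid), List.getElem_map]
      rw [he', pvWinEq_mid S line.toList i hmid, List.getD_eq_getElem _ _ hi,
        List.getD_eq_getElem _ _ hmid]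
      rfl
  have hlist : (PySem.Str.replace (PySem.Str.strip (PySem.Str.replace (PySem.Str.join " "
        (L.map (fun line => PySem.Str.slice line (some (Int.ofNat (S[i]'hi))) e))) "|" "")) "_" " ").toList
      = PySem.Chars.replace (PySem.Chars.strip (PySem.Chars.join [' ']
          (L.map (fun line => pvWin S line.toList i)))) ['_'] [' '] := by
    rw [PySem.Str.toList_replace, PySem.Str.toList_strip, PySem.Str.toList_replace,
      PySem.Str.toList_join]
    rw [show ("_" : String).toList = ['_'] from rfl, show (" " : String).toList = [' '] from rfl,
      show ("|" : String).toList = ['|'] from rfl, show ("" : String).toList = ([] : List Char) from rfl]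
    rw [pvReplace_filter, pvFilter_join, List.map_map, List.map_map]
    congr 3
    apply List.map_congr_left
    intro line _
    simp only [Function.comp, PySem.Str.toList_slice, PySem.Chars.slice_eq_listSlice]
    exact hwin line
  rw [← hlist, String.ofList_toList]

-- ===== VERDICT (by name: the statement is the Claim_ definition above) =====
theorem detect_colums_spec : Claim_equal_detect_colums := by
  intro L _
  show detect_colums L = detect_colums_alt L
  cases L with
  | nil => rfl
  | cons l0 rest =>
    have hSpair : (pvS (l0 :: rest)).Pairwise (· < ·) := List.pairwise_lt_range.filter _
    obtain ⟨fd, hfold⟩ := pvFold_spec (l0 :: rest)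
      ((((l0 :: rest).map (fun l => l.toList.length)).min?).getD 0)
    have hSrfl : ((List.range ((((l0 :: rest).map (fun l => l.toList.length)).min?).getD 0)).filter
        (pvP (l0 :: rest))) = pvS (l0 :: rest) := rfl
    rw [hSrfl] at hfold
    -- per-line pointer walk result
    have hwalk : ∀ line : String,
        ((PySem.List.enumerate line.toList).foldl (pvStepB ((pvS (l0 :: rest)).map Int.ofNat))
          (((pvS (l0 :: rest)).map Int.ofNat).map (fun _ => []), -1)).1
          = (List.range (pvS (l0 :: rest)).length).map (fun j => pvWin (pvS (l0 :: rest)) line.toList j) := by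
      intro line
      have hw := pvWalk (pvS (l0 :: rest)) hSpair line.toList 0
        (((pvS (l0 :: rest)).map Int.ofNat).map (fun _ => [])) (by simp)
      have h0 : (pvS (l0 :: rest)).countP (fun x => decide (x < 0)) = 0 := by
        simp
      rw [h0] at hw
      simp only [Nat.cast_zero, Nat.zero_add, zero_sub] at hw
      have hfst := congrArg Prod.fst hw
      simp only at hfst
      rw [hfst]
      apply List.map_congr_left
      intro j _
      rw [pvGetDConst]
      rfl
    -- the groups transpose
    have hgroups :
        (l0 :: rest).foldl
          (fun (groups : List (List (List Char))) (line : String) =>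
            (groups.zip ((PySem.List.enumerate line.toList).foldl
              (pvStepB ((pvS (l0 :: rest)).map Int.ofNat))
              ((((pvS (l0 :: rest)).map Int.ofNat).map (fun _ => [])), -1)).1).map
              (fun q => q.1 ++ [q.2]))
          ((((pvS (l0 :: rest)).map Int.ofNat).map (fun _ => [])))
        = (List.range (pvS (l0 :: rest)).length).map
            (fun j => (l0 :: rest).map (fun line => pvWin (pvS (l0 :: rest)) line.toList j)) := by
      have hfun : (fun (groups : List (List (List Char))) (line : String) =>
            (groups.zip ((PySem.List.enumerate line.toList).foldl
              (pvStepB ((pvS (l0 :: rest)).map Int.ofNat))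
              ((((pvS (l0 :: rest)).map Int.ofNat).map (fun _ => [])), -1)).1).map
              (fun q => q.1 ++ [q.2]))
          = (fun (G : List (List (List Char))) line =>
              (G.zip ((List.range (pvS (l0 :: rest)).length).map
                (fun j => pvWin (pvS (l0 :: rest)) line.toList j))).map (fun q => q.1 ++ [q.2])) := by
        funext G line; rw [hwalk]
      have hinit : (((pvS (l0 :: rest)).map Int.ofNat).map (fun _ => ([] : List (List Char))))
          = (List.range (pvS (l0 :: rest)).length).map (fun _ => ([] : List (List Char))) := by
        apply List.ext_getElem <;> simp
      rw [hfun, hinit, pvTrans (pvS (l0 :: rest)).length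
        (fun line j => pvWin (pvS (l0 :: rest)) line.toList j) (l0 :: rest) (fun _ => [])]
      simp
    simp only [detect_colums, detect_colums_alt]
    rw [hfold]
    simp only [List.map_cons]
    rw [pvStarts_eq l0 rest, hgroups]
    rw [List.map_map, List.map_map]
    apply List.ext_getElem
    · simp [PySem.List.length_enumerate]
    · intro i h1 h2
      have hi : i < (pvS (l0 :: rest)).length := by
        simpa [PySem.List.length_enumerate] using h1
      simp only [List.getElem_map, PySem.List.getElem_enumerate, List.getElem_range, Function.comp]
      exact pvCell (l0 :: rest) (pvS (l0 :: rest)) i hi
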